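-- pv_equiv track=rewrite | github.com/denaltro/rest-tree | tree/model.py | get_with_parents_array
-- ===== SOURCE A (Python) =====
-- def get_with_parents_array(id):
--     if not id:
--         return None
--
--     arr = id.split('.')
--     length = len(arr)
--     if length == 1:
--         return None
--
--     result = []
--     for i in range(0, length):
--         result.append('.'.join(arr[0:i+1]))
--     return result
-- ===== SOURCE B (Python) =====
-- def get_with_parents_array(id):
--     if not id:
--         return None
--
--     arr = id.split('.')
--     if len(arr) == 1:
--         return None
--
--     current = arr[0]
--     result = [current]
--     for part in arr[1:]:
--         current = '.'.join((current, part))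
--         result.append(current)
--     return result
-- ===== Notes on version B (the rewrite author's own statement) =====
-- stated objective: simpler
-- what changed: B keeps a running prefix string and extends it by one part per iteration (a cumulative scan), instead of A's re-joining the slice arr[0:i+1] from scratch on every iteration.
import Mathlib
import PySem

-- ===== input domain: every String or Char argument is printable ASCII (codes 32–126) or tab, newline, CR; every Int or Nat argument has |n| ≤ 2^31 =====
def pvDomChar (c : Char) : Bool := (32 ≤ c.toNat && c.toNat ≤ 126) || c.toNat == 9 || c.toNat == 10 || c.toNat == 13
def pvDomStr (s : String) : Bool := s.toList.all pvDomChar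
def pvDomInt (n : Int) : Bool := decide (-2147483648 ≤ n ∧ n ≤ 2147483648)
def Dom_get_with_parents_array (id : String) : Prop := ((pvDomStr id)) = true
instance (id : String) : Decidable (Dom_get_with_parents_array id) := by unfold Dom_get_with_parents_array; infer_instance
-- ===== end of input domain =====

-- B builds the cumulative dotted prefixes with a running accumulator (one join of two strings per step) instead of re-joining the slice arr[0:i+1] at every index; return values proved equal on all strings.

-- ===== PORT A =====
def get_with_parents_array (id : String) : Option (List String) :=
  if id = "" then none
  else
    match PySem.Str.split? id "." with
    | none => none   -- unreachable: the separator "." is nonempty, split never raises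
    | some arr =>
      -- 'length' (= len(arr)) inlined
      if PySem.List.len arr = 1 then none
      else
        some ((PySem.List.pyRange 0 (PySem.List.len arr) 1).foldl
          (fun result i =>
            result ++ [PySem.Str.join "." (PySem.List.slice arr (some 0) (some (i + 1)))]) [])

-- ===== PORT B =====
def get_with_parents_array_alt (id : String) : Option (List String) :=
  if id = "" then none
  else
    match PySem.Str.split? id "." with
    | none => none   -- unreachable: the separator "." is nonempty, split never raises
    | some arr =>
      if PySem.List.len arr = 1 then none
      else
        match arr with
        | [] => none   -- unreachable: str.split never returns an empty list (Python's arr[0] here)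
        | h :: t =>
          some ((t.foldl
            (fun (st : List String × String) part =>
              let cur := PySem.Str.join "." [st.2, part]
              (st.1 ++ [cur], cur)) ([h], h)).1)

-- ===== PRECONDITION & SPEC =====
def Spec_get_with_parents_array (id : String) (out : Option (List String)) : Prop := out = get_with_parents_array_alt id
instance (id : String) (out : Option (List String)) : Decidable (Spec_get_with_parents_array id out) := by unfold Spec_get_with_parents_array; infer_instance

-- ===== CLAIM (what is proved, stated in full; the proofs are below) =====
def Claim_equal_get_with_parents_array : Prop := ∀ (id : String), Dom_get_with_parents_array id → Spec_get_with_parents_array id (get_with_parents_array id)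

-- ===== LEMMAS AND PROOFS =====

-- joining a one-element list is the identity
theorem pvJoinSingleton (x : String) : PySem.Str.join "." [x] = x := by
  apply String.toList_injective
  simp [PySem.Str.toList_join, PySem.Chars.join_singleton]

-- Chars-level: appending one more piece to a nonempty join
theorem pvCharsJoinSnoc (sep : List Char) (pre : List (List Char)) (hpre : pre ≠ []) (x : List Char) :
    PySem.Chars.join sep (pre ++ [x]) = PySem.Chars.join sep pre ++ sep ++ x := by
  induction pre with
  | nil => exact absurd rfl hpre
  | cons a rest ih =>
    cases rest with
    | nil => simp [PySem.Chars.join_cons_cons, PySem.Chars.join_singleton]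
    | cons b rest' =>
      rw [List.cons_append, PySem.Chars.join_cons_cons, List.cons_append,
        PySem.Chars.join_cons_cons]
      rw [← List.cons_append, ih (by simp)]
      simp [List.append_assoc]

-- String-level: extending a running joined prefix by one part equals joining the longer list
theorem pvJoinSnoc (pre : List String) (hpre : pre ≠ []) (x : String) :
    PySem.Str.join "." [PySem.Str.join "." pre, x] = PySem.Str.join "." (pre ++ [x]) := by
  apply String.toList_injective
  simp only [PySem.Str.toList_join, List.map_append, List.map_cons, List.map_nil]
  rw [pvCharsJoinSnoc _ _ (by simpa using hpre)]
  rw [PySem.Chars.join_cons_cons]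
  simp [PySem.Chars.join_singleton]

-- invariant of B's accumulator loop
theorem pvFoldB (t : List String) : ∀ (res pre : List String), pre ≠ [] →
    (t.foldl (fun (st : List String × String) part =>
        let cur := PySem.Str.join "." [st.2, part]
        (st.1 ++ [cur], cur)) (res, PySem.Str.join "." pre)).1
    = res ++ (List.range t.length).map (fun k => PySem.Str.join "." (pre ++ List.take (k + 1) t)) := by
  induction t with
  | nil => intro res pre _; simp
  | cons p t' ih =>
    intro res pre hpre
    simp only [List.foldl_cons]
    rw [pvJoinSnoc pre hpre p]
    rw [ih (res ++ [PySem.Str.join "." (pre ++ [p])]) (pre ++ [p]) (by simp)]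
    have hr : (List.range (p :: t').length).map (fun k => PySem.Str.join "." (pre ++ List.take (k + 1) (p :: t')))
        = PySem.Str.join "." (pre ++ [p]) :: (List.range t'.length).map (fun k => PySem.Str.join "." ((pre ++ [p]) ++ List.take (k + 1) t')) := by
      rw [List.length_cons, List.range_succ_eq_map, List.map_cons, List.map_map]
      refine List.cons_eq_cons.mpr ⟨?_, ?_⟩
      · simp
      · apply List.map_congr_left
        intro k _
        simp [Function.comp, List.append_assoc]
    rw [hr]
    rw [List.append_assoc, List.singleton_append]

-- A's loop computes the joined (k+1)-prefixes of arr
theorem pvFoldA (arr : List String) :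
    (PySem.List.pyRange 0 (PySem.List.len arr) 1).foldl
      (fun result i =>
        result ++ [PySem.Str.join "." (PySem.List.slice arr (some 0) (some (i + 1)))]) []
    = (List.range arr.length).map (fun k => PySem.Str.join "." (List.take (k + 1) arr)) := by
  rw [PySem.List.foldl_append_eq_flatMap]
  rw [List.nil_append]
  have hflat : ∀ (f : Int → String) (l : List Int),
      l.flatMap (fun i => [f i]) = l.map f := by
    intro f l; induction l with
    | nil => rfl
    | cons a l ih => simp [List.flatMap_cons, ih]
  rw [hflat]
  rw [PySem.List.pyRange_one]
  have hlen : ((PySem.List.len arr : Int) - 0).toNat = arr.length := by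
    simp [PySem.List.len_eq]
  rw [hlen, List.map_map]
  apply List.map_congr_left
  intro k hk
  simp only [Function.comp_apply, zero_add]
  have h1 : ((k : Int) + 1) = ((k + 1 : Nat) : Int) := by push_cast; ring
  rw [h1]
  rw [PySem.List.slice_zero_start, PySem.List.slice_to_natCast]

-- B's accumulator value equals A's list of joined prefixes
theorem pvAltVal (h : String) (t : List String) :
    ((t.foldl (fun (st : List String × String) part =>
        let cur := PySem.Str.join "." [st.2, part]
        (st.1 ++ [cur], cur)) ([h], h)).1)
    = (List.range (h :: t).length).map (fun k => PySem.Str.join "." (List.take (k + 1) (h :: t))) := by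
  conv_lhs => rw [show (([h], h) : List String × String) = ([h], PySem.Str.join "." [h]) from by rw [pvJoinSingleton]]
  rw [pvFoldB t [h] [h] (by simp)]
  have hr : (List.range (h :: t).length).map (fun k => PySem.Str.join "." (List.take (k + 1) (h :: t)))
      = h :: (List.range t.length).map (fun k => PySem.Str.join "." ([h] ++ List.take (k + 1) t)) := by
    rw [List.length_cons, List.range_succ_eq_map, List.map_cons, List.map_map]
    refine List.cons_eq_cons.mpr ⟨?_, ?_⟩
    · simp [pvJoinSingleton]
    · apply List.map_congr_left
      intro k _
      simp [Function.comp]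
  rw [hr, List.singleton_append]

-- splitOn's worker always produces at least one piece
theorem pvGoNeNil (sep : List Char) (fuel : Nat) : ∀ (l cur : List Char) (acc : List (List Char)),
    PySem.Chars.splitOn.go sep fuel l cur acc ≠ [] := by
  induction fuel with
  | zero =>
    intro l cur acc
    simp [PySem.Chars.splitOn.go]
  | succ fuel ih =>
    intro l cur acc
    cases l with
    | nil => simp [PySem.Chars.splitOn.go]
    | cons c rest =>
      simp only [PySem.Chars.splitOn.go]
      split
      · exact ih _ _ _
      · exact ih _ _ _

theorem pvSplitOnNeNil (s sep : List Char) : PySem.Chars.splitOn s sep ≠ [] := by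
  unfold PySem.Chars.splitOn
  exact pvGoNeNil sep (s.length + 1) s [] []

-- str.split with separator "." never yields the empty list
theorem pvSplitNeNil (s : String) (arr : List String)
    (h : PySem.Str.split? s "." = some arr) : arr ≠ [] := by
  intro hnil
  subst hnil
  have hb := PySem.Str.split?_map s "."
  rw [h] at hb
  simp [PySem.Chars.split?] at hb
  exact pvSplitOnNeNil s.toList ".".toList hb

-- ===== VERDICT (by name: the statement is the Claim_ definition above) =====
theorem get_with_parents_array_spec : Claim_equal_get_with_parents_array := by
  intro id _
  unfold Spec_get_with_parents_array get_with_parents_array get_with_parents_array_alt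
  by_cases hid : id = ""
  · simp [hid]
  · rw [if_neg hid, if_neg hid]
    cases hsplit : PySem.Str.split? id "." with
    | none => rfl
    | some arr =>
      have hne := pvSplitNeNil id arr hsplit
      cases arr with
      | nil => exact absurd rfl hne
      | cons h t =>
        show (if PySem.List.len (h :: t) = 1 then none
            else some ((PySem.List.pyRange 0 (PySem.List.len (h :: t)) 1).foldl
              (fun result i =>
                result ++ [PySem.Str.join "." (PySem.List.slice (h :: t) (some 0) (some (i + 1)))]) []))
          = (if PySem.List.len (h :: t) = 1 then none
            else some ((t.foldl
              (fun (st : List String × String) part =>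
                let cur := PySem.Str.join "." [st.2, part]
                (st.1 ++ [cur], cur)) ([h], h)).1))
        by_cases hlen : PySem.List.len (h :: t) = (1 : Int)
        · rw [if_pos hlen, if_pos hlen]
        · rw [if_neg hlen, if_neg hlen]
          rw [pvFoldA (h :: t), pvAltVal]
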